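-- pv_equiv track=rewrite | github.com/karunakar23/Cultivo | app.py | simple_fert
-- ===== SOURCE A (Python) =====
-- def simple_fert(crop):
--     l=[]
--     asl=['Maize','Sugarcane','Cotton','Tobacco','Paddy','Barley','Wheat','Millets','Oil seeds','Pulses','Ground Nuts']
--     for i in range(len(asl)):
--         if asl[i]==crop:
--             l.append(1)
--         else:
--             l.append(0)
--     return l
-- ===== SOURCE B (Python) =====
-- _ONE_HOT = {
--     'Maize':       [1,0,0,0,0,0,0,0,0,0,0],
--     'Sugarcane':   [0,1,0,0,0,0,0,0,0,0,0],
--     'Cotton':      [0,0,1,0,0,0,0,0,0,0,0],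
--     'Tobacco':     [0,0,0,1,0,0,0,0,0,0,0],
--     'Paddy':       [0,0,0,0,1,0,0,0,0,0,0],
--     'Barley':      [0,0,0,0,0,1,0,0,0,0,0],
--     'Wheat':       [0,0,0,0,0,0,1,0,0,0,0],
--     'Millets':     [0,0,0,0,0,0,0,1,0,0,0],
--     'Oil seeds':   [0,0,0,0,0,0,0,0,1,0,0],
--     'Pulses':      [0,0,0,0,0,0,0,0,0,1,0],
--     'Ground Nuts': [0,0,0,0,0,0,0,0,0,0,1],
-- }
-- _ZEROS = [0,0,0,0,0,0,0,0,0,0,0]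
--
-- def simple_fert(crop):
--     return list(_ONE_HOT.get(crop, _ZEROS))
-- ===== Notes on version B (the rewrite author's own statement) =====
-- stated objective: alternative
-- what changed: B replaces A's per-element compare-and-append loop by a precomputed lookup table mapping each crop name to its one-hot row, returning a copy of the row (all-zeros row for unknown crops) with no comparison loop at call time.
import Mathlib
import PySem

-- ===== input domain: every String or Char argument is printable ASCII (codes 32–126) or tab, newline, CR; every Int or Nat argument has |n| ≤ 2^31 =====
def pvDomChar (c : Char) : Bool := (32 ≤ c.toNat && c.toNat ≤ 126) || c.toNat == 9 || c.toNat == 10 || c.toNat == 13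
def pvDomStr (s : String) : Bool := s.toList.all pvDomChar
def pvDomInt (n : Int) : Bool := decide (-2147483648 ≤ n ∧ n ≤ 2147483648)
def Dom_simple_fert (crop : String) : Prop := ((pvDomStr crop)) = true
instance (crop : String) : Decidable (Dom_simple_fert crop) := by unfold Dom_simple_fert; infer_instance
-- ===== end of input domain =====

-- B replaces A's compare-and-append loop by a precomputed lookup table (crop → one-hot row, all-zeros default); objective: alternative.

-- ===== PORT A =====
def aslA : List String := ["Maize","Sugarcane","Cotton","Tobacco","Paddy","Barley","Wheat","Millets","Oil seeds","Pulses","Ground Nuts"]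

def simple_fert (crop : String) : List Int :=
  (PySem.List.pyRange 0 aslA.length 1).foldl
    (fun l i => if PySem.List.pyGetD aslA i "" == crop then l ++ [1] else l ++ [0]) []

-- ===== PORT B =====
def oneHotTable : PySem.Dict String (List Int) :=
  PySem.Dict.ofList
    [("Maize",       [1,0,0,0,0,0,0,0,0,0,0]),
     ("Sugarcane",   [0,1,0,0,0,0,0,0,0,0,0]),
     ("Cotton",      [0,0,1,0,0,0,0,0,0,0,0]),
     ("Tobacco",     [0,0,0,1,0,0,0,0,0,0,0]),
     ("Paddy",       [0,0,0,0,1,0,0,0,0,0,0]),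
     ("Barley",      [0,0,0,0,0,1,0,0,0,0,0]),
     ("Wheat",       [0,0,0,0,0,0,1,0,0,0,0]),
     ("Millets",     [0,0,0,0,0,0,0,1,0,0,0]),
     ("Oil seeds",   [0,0,0,0,0,0,0,0,1,0,0]),
     ("Pulses",      [0,0,0,0,0,0,0,0,0,1,0]),
     ("Ground Nuts", [0,0,0,0,0,0,0,0,0,0,1])]

def zeroRow : List Int := [0,0,0,0,0,0,0,0,0,0,0]

def simple_fert_alt (crop : String) : List Int :=
  PySem.Dict.getD oneHotTable crop zeroRow

-- ===== PRECONDITION & SPEC =====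
def Spec_simple_fert (crop : String) (out : List Int) : Prop := out = simple_fert_alt crop
instance (crop : String) (out : List Int) : Decidable (Spec_simple_fert crop out) := by unfold Spec_simple_fert; infer_instance

-- ===== CLAIM =====
def Claim_equal_simple_fert : Prop := ∀ (crop : String), Dom_simple_fert crop → Spec_simple_fert crop (simple_fert crop)

-- ===== LEMMAS AND PROOFS =====

theorem fert_eq (crop : String) : simple_fert crop = simple_fert_alt crop := by
  by_cases h1 : crop = "Maize"; · subst h1; decide
  by_cases h2 : crop = "Sugarcane"; · subst h2; decide
  by_cases h3 : crop = "Cotton"; · subst h3; decide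
  by_cases h4 : crop = "Tobacco"; · subst h4; decide
  by_cases h5 : crop = "Paddy"; · subst h5; decide
  by_cases h6 : crop = "Barley"; · subst h6; decide
  by_cases h7 : crop = "Wheat"; · subst h7; decide
  by_cases h8 : crop = "Millets"; · subst h8; decide
  by_cases h9 : crop = "Oil seeds"; · subst h9; decide
  by_cases h10 : crop = "Pulses"; · subst h10; decide
  by_cases h11 : crop = "Ground Nuts"; · subst h11; decide
  -- unknown crop: A appends eleven zeros, B returns the default zero row
  simp only [simple_fert, simple_fert_alt, aslA, oneHotTable, zeroRow]
  have hr : PySem.List.pyRange 0 11 1 = [0,1,2,3,4,5,6,7,8,9,10] := by decide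
  norm_num
  rw [hr]
  simp only [List.foldl]
  have hitems : (PySem.Dict.ofList
      [("Maize",       ([1,0,0,0,0,0,0,0,0,0,0] : List Int)),
       ("Sugarcane",   [0,1,0,0,0,0,0,0,0,0,0]),
       ("Cotton",      [0,0,1,0,0,0,0,0,0,0,0]),
       ("Tobacco",     [0,0,0,1,0,0,0,0,0,0,0]),
       ("Paddy",       [0,0,0,0,1,0,0,0,0,0,0]),
       ("Barley",      [0,0,0,0,0,1,0,0,0,0,0]),
       ("Wheat",       [0,0,0,0,0,0,1,0,0,0,0]),
       ("Millets",     [0,0,0,0,0,0,0,1,0,0,0]),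
       ("Oil seeds",   [0,0,0,0,0,0,0,0,1,0,0]),
       ("Pulses",      [0,0,0,0,0,0,0,0,0,1,0]),
       ("Ground Nuts", [0,0,0,0,0,0,0,0,0,0,1])]).items =
      [("Maize",       [1,0,0,0,0,0,0,0,0,0,0]),
       ("Sugarcane",   [0,1,0,0,0,0,0,0,0,0,0]),
       ("Cotton",      [0,0,1,0,0,0,0,0,0,0,0]),
       ("Tobacco",     [0,0,0,1,0,0,0,0,0,0,0]),
       ("Paddy",       [0,0,0,0,1,0,0,0,0,0,0]),
       ("Barley",      [0,0,0,0,0,1,0,0,0,0,0]),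
       ("Wheat",       [0,0,0,0,0,0,1,0,0,0,0]),
       ("Millets",     [0,0,0,0,0,0,0,1,0,0,0]),
       ("Oil seeds",   [0,0,0,0,0,0,0,0,1,0,0]),
       ("Pulses",      [0,0,0,0,0,0,0,0,0,1,0]),
       ("Ground Nuts", [0,0,0,0,0,0,0,0,0,0,1])] := by decide
  have b1 : ("Maize" == crop) = false := by simp [Ne.symm h1]
  have b2 : ("Sugarcane" == crop) = false := by simp [Ne.symm h2]
  have b3 : ("Cotton" == crop) = false := by simp [Ne.symm h3]
  have b4 : ("Tobacco" == crop) = false := by simp [Ne.symm h4]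
  have b5 : ("Paddy" == crop) = false := by simp [Ne.symm h5]
  have b6 : ("Barley" == crop) = false := by simp [Ne.symm h6]
  have b7 : ("Wheat" == crop) = false := by simp [Ne.symm h7]
  have b8 : ("Millets" == crop) = false := by simp [Ne.symm h8]
  have b9 : ("Oil seeds" == crop) = false := by simp [Ne.symm h9]
  have b10 : ("Pulses" == crop) = false := by simp [Ne.symm h10]
  have b11 : ("Ground Nuts" == crop) = false := by simp [Ne.symm h11]
  simp [PySem.List.pyGetD, PySem.List.pyGet?, PySem.List.pyIdx?,
    PySem.Dict.getD, PySem.Dict.get?, hitems, List.find?,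
    b1, b2, b3, b4, b5, b6, b7, b8, b9, b10, b11,
    Ne.symm h1, Ne.symm h2, Ne.symm h3, Ne.symm h4, Ne.symm h5, Ne.symm h6,
    Ne.symm h7, Ne.symm h8, Ne.symm h9, Ne.symm h10, Ne.symm h11]

-- ===== VERDICT =====
theorem simple_fert_spec : Claim_equal_simple_fert := by
  intro crop _
  exact fert_eq crop
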